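-- pv_equiv track=rewrite | github.com/Mapbaya/SA-_IHM_2025-grp16 | App1/modeles/modelePlan.py | generation_cases_tableau_complet
-- ===== SOURCE A (Python) =====
-- def generation_cases_tableau_complet(nb_col, nb_lignes):
--     liste_cases = []
--
--     for i in range(nb_col):
--         for j in range(nb_lignes):
--             if (i < 26) :
--                 coord : str = chr(ord('A') + i) + str(j + 1)
--                 liste_cases.append(coord)
--             else:
--                 coord : str = 'A' + chr(ord('A') + i % 26) + str(j + 1)
--                 liste_cases.append(coord)
--
--     return liste_cases
-- ===== SOURCE B (Python) =====
-- def generation_cases_tableau_complet(nb_col, nb_lignes):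
--     if nb_col <= 0 or nb_lignes <= 0:
--         return []
--     res = []
--     for k in range(nb_col * nb_lignes):
--         i, j = divmod(k, nb_lignes)
--         prefix = chr(ord('A') + i) if i < 26 else 'A' + chr(ord('A') + i % 26)
--         res.append(prefix + str(j + 1))
--     return res
-- ===== Notes on version B (the rewrite author's own statement) =====
-- stated objective: alternative
-- what changed: Replaces the nested column/row loops by a single flat loop over range(nb_col*nb_lignes) that recovers (column,row) with divmod, after an explicit empty-grid early return.
import Mathlib
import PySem

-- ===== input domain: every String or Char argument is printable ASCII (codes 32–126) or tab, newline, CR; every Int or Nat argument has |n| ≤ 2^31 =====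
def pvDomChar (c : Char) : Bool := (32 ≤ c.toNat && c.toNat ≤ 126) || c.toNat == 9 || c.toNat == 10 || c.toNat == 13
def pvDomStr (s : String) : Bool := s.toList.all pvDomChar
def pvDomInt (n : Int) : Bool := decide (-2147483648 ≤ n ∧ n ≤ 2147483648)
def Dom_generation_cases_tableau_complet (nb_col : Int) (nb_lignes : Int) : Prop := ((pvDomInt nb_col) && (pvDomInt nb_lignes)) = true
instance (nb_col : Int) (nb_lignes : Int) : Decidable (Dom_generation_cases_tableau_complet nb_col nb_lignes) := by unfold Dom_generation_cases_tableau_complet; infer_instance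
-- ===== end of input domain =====

-- B replaces A's nested column/row loops by one flat loop over nb_col*nb_lignes indices
-- decoded with divmod (alternative decomposition, same cost); A = B is proved on all of Dom.

-- ===== PORT A =====
def generation_cases_tableau_complet (nb_col : Int) (nb_lignes : Int) : List String :=
  (PySem.List.pyRange 0 nb_col 1).foldl (fun liste_cases i =>
    (PySem.List.pyRange 0 nb_lignes 1).foldl (fun liste_cases j =>
      if i < 26 then
        liste_cases ++ [String.mk [Char.ofNat (65 + i).toNat] ++ PySem.Int.toStr (j + 1)]
      else
        liste_cases ++ [String.mk ['A', Char.ofNat (65 + PySem.Int.mod i 26).toNat] ++ PySem.Int.toStr (j + 1)])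
      liste_cases) []

-- ===== PORT B =====
def generation_cases_tableau_complet_alt (nb_col : Int) (nb_lignes : Int) : List String :=
  if nb_col ≤ 0 ∨ nb_lignes ≤ 0 then []
  else
    (PySem.List.pyRange 0 (nb_col * nb_lignes) 1).foldl (fun res k =>
      let i := PySem.Int.floordiv k nb_lignes
      let j := PySem.Int.mod k nb_lignes
      let pre := if i < 26 then String.mk [Char.ofNat (65 + i).toNat]
                 else String.mk ['A', Char.ofNat (65 + PySem.Int.mod i 26).toNat]
      res ++ [pre ++ PySem.Int.toStr (j + 1)]) []

-- ===== PRECONDITION & SPEC =====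
def Spec_generation_cases_tableau_complet (nb_col : Int) (nb_lignes : Int) (out : List String) : Prop := out = generation_cases_tableau_complet_alt nb_col nb_lignes
instance (nb_col : Int) (nb_lignes : Int) (out : List String) : Decidable (Spec_generation_cases_tableau_complet nb_col nb_lignes out) := by unfold Spec_generation_cases_tableau_complet; infer_instance

-- ===== CLAIM (what is proved, stated in full; the proofs are below) =====
def Claim_equal_generation_cases_tableau_complet : Prop := ∀ (nb_col : Int) (nb_lignes : Int), Dom_generation_cases_tableau_complet nb_col nb_lignes → Spec_generation_cases_tableau_complet nb_col nb_lignes (generation_cases_tableau_complet nb_col nb_lignes)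

-- ===== LEMMAS AND PROOFS =====

/-- The label both programs build for column `i`, row `j`. -/
def pvLab (i j : Int) : String :=
  (if i < 26 then String.mk [Char.ofNat (65 + i).toNat]
   else String.mk ['A', Char.ofNat (65 + PySem.Int.mod i 26).toNat]) ++ PySem.Int.toStr (j + 1)

theorem foldl_push_map {α β : Type} (f : α → β) (l : List α) (acc : List β) :
    l.foldl (fun a x => a ++ [f x]) acc = acc ++ l.map f := by
  induction l generalizing acc with
  | nil => simp
  | cons x xs ih => simp [List.foldl, ih, List.append_assoc]

theorem portA_flat (nb_col nb_lignes : Int) :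
    generation_cases_tableau_complet nb_col nb_lignes =
      (PySem.List.pyRange 0 nb_col 1).flatMap (fun i =>
        (PySem.List.pyRange 0 nb_lignes 1).map (pvLab i)) := by
  unfold generation_cases_tableau_complet
  have hinner : ∀ i : Int,
      (fun (liste_cases : List String) (j : Int) =>
        if i < 26 then
          liste_cases ++ [String.mk [Char.ofNat (65 + i).toNat] ++ PySem.Int.toStr (j + 1)]
        else
          liste_cases ++ [String.mk ['A', Char.ofNat (65 + PySem.Int.mod i 26).toNat] ++ PySem.Int.toStr (j + 1)])
      = (fun liste_cases j => liste_cases ++ [pvLab i j]) := by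
    intro i
    funext a j
    by_cases h : i < 26 <;> simp [pvLab, h]
  calc (PySem.List.pyRange 0 nb_col 1).foldl (fun liste_cases i =>
        (PySem.List.pyRange 0 nb_lignes 1).foldl _ liste_cases) []
      = (PySem.List.pyRange 0 nb_col 1).foldl (fun acc i =>
          acc ++ (PySem.List.pyRange 0 nb_lignes 1).map (pvLab i)) [] := by
        congr 1
        funext acc i
        rw [hinner i, foldl_push_map]
    _ = _ := by
        rw [PySem.List.foldl_append_eq_flatMap]
        simp

theorem portB_flat (nb_col nb_lignes : Int) (hc : 0 < nb_col) (hl : 0 < nb_lignes) :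
    generation_cases_tableau_complet_alt nb_col nb_lignes =
      (PySem.List.pyRange 0 (nb_col * nb_lignes) 1).map (fun k =>
        pvLab (PySem.Int.floordiv k nb_lignes) (PySem.Int.mod k nb_lignes)) := by
  unfold generation_cases_tableau_complet_alt
  rw [if_neg (by omega)]
  have hfun : (fun (res : List String) (k : Int) =>
      let i := PySem.Int.floordiv k nb_lignes
      let j := PySem.Int.mod k nb_lignes
      let pre := if i < 26 then String.mk [Char.ofNat (65 + i).toNat]
                 else String.mk ['A', Char.ofNat (65 + PySem.Int.mod i 26).toNat]
      res ++ [pre ++ PySem.Int.toStr (j + 1)])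
      = (fun res k => res ++ [pvLab (PySem.Int.floordiv k nb_lignes) (PySem.Int.mod k nb_lignes)]) := by
    funext res k
    by_cases h : PySem.Int.floordiv k nb_lignes < 26 <;> simp [pvLab, h]
  rw [hfun, foldl_push_map]
  simp

/-- Core combinatorial identity, in Nat form. -/
theorem flat_eq_nested (c l : Nat) (hl : 0 < l) :
    (List.range (c * l)).map (fun k : Nat =>
        pvLab (PySem.Int.floordiv (k : Int) (l : Int)) (PySem.Int.mod (k : Int) (l : Int))) =
      (List.range c).flatMap (fun i : Nat =>
        (List.range l).map (fun j : Nat => pvLab (i : Int) (j : Int))) := by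
  induction c with
  | zero => simp
  | succ c ih =>
    rw [Nat.succ_mul, List.range_add, List.map_append, ih,
        List.range_succ, List.flatMap_append]
    congr 1
    simp only [List.flatMap_singleton, List.map_map]
    apply List.map_congr_left
    intro j hj
    rw [List.mem_range] at hj
    have hd : PySem.Int.floordiv ((c * l + j : Nat) : Int) ((l : Nat) : Int) = ((c : Nat) : Int) := by
      rw [PySem.Int.floordiv_natCast]
      congr 1
      rw [Nat.mul_comm c l, Nat.mul_add_div hl, Nat.div_eq_of_lt hj]
      omega
    have hm : PySem.Int.mod ((c * l + j : Nat) : Int) ((l : Nat) : Int) = ((j : Nat) : Int) := by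
      rw [PySem.Int.mod_natCast]
      congr 1
      rw [Nat.mul_comm c l, Nat.mul_add_mod, Nat.mod_eq_of_lt hj]
    simp only [Function.comp]
    rw [hd, hm]

-- ===== VERDICT (by name: the statement is the Claim_ definition above) =====
theorem generation_cases_tableau_complet_spec : Claim_equal_generation_cases_tableau_complet := by
  intro nb_col nb_lignes _
  unfold Spec_generation_cases_tableau_complet
  by_cases hc : nb_col ≤ 0
  · rw [portA_flat]
    unfold generation_cases_tableau_complet_alt
    rw [if_pos (Or.inl hc)]
    rw [PySem.List.pyRange_one_eq_nil (a := 0) (b := nb_col) (by omega)]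
    simp
  · by_cases hl : nb_lignes ≤ 0
    · rw [portA_flat]
      unfold generation_cases_tableau_complet_alt
      rw [if_pos (Or.inr hl)]
      have hnil : PySem.List.pyRange 0 nb_lignes 1 = [] :=
        PySem.List.pyRange_one_eq_nil (a := 0) (b := nb_lignes) (by omega)
      rw [hnil]
      simp
    · push Not at hc hl
      rw [portA_flat, portB_flat nb_col nb_lignes hc hl]
      obtain ⟨c, rfl⟩ : ∃ c : Nat, nb_col = (c : Int) := ⟨nb_col.toNat, by omega⟩
      obtain ⟨l, rfl⟩ : ∃ l : Nat, nb_lignes = (l : Int) := ⟨nb_lignes.toNat, by omega⟩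
      have hcl : ((c : Int) * (l : Int)) = ((c * l : Nat) : Int) := by push_cast; ring
      have hl' : 0 < l := by exact_mod_cast hl
      rw [hcl, PySem.List.pyRange_zero_nat, PySem.List.pyRange_zero_nat, PySem.List.pyRange_zero_nat]
      rw [List.flatMap_map, List.map_map]
      simp only [List.map_map, Function.comp_def]
      exact (flat_eq_nested c l hl').symm
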